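-- pv_equiv track=rewrite | github.com/gc2321/Coursera_PC_1 | week1_2048_merge.py | slide
-- ===== SOURCE A (Python) =====
-- def slide(line):
--     """
--     Function that slide tiles to the front
--     """
--     _original_list = line
--     _new_list = []
--     _nr_zero = 0
--
--     # count number of zero in list
--     for item in _original_list:
--         if item == 0:
--             _nr_zero +=1
--
--     # slide all non-zero value to the front
--     for item in _original_list:
--         if item!=0:
--             _new_list.append(item)
--
--     # add all the zeros at the end
--     for item in range(_nr_zero):
--         _new_list.append(0)
--
--     # return new list
--     return _new_list
-- ===== SOURCE B (Python) =====
-- def slide(line):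
--     # Stable sort on a boolean key: non-zero tiles (False) keep order in front, zeros (True) go last.
--     return sorted(line, key=lambda x: x == 0)
-- ===== Notes on version B (the rewrite author's own statement) =====
-- stated objective: alternative
-- what changed: Replaces A's three explicit passes (count zeros, collect non-zeros, pad zeros) with a single stable sort on the boolean key x==0, whose stability packs non-zero tiles in order ahead of zeros.
import Mathlib
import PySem

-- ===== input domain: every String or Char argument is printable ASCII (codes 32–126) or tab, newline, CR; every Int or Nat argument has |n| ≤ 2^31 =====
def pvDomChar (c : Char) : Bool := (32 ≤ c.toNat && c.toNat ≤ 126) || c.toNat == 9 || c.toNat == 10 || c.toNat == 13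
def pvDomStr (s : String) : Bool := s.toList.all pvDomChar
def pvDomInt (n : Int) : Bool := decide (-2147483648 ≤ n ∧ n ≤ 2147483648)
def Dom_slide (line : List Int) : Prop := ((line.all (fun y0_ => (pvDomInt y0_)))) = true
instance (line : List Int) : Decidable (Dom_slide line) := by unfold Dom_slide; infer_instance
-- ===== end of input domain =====

-- B slides via one stable sort on the boolean key (x == 0) instead of A's three passes; objective: alternative decomposition.

-- ===== PORT A =====
def slide (line : List Int) : List Int :=
  -- count number of zero in list
  let nrZero : Int := line.foldl (fun n item => if item = 0 then n + 1 else n) 0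
  -- slide all non-zero value to the front
  let newList : List Int := line.foldl (fun acc item => if item ≠ 0 then acc ++ [item] else acc) []
  -- add all the zeros at the end
  (PySem.List.pyRange 0 nrZero 1).foldl (fun acc _ => acc ++ [(0 : Int)]) newList

-- ===== PORT B =====
def slide_alt (line : List Int) : List Int :=
  PySem.List.sorted line (fun x => x == 0)

-- ===== PRECONDITION & SPEC =====
def Spec_slide (line : List Int) (out : List Int) : Prop := out = slide_alt line
instance (line : List Int) (out : List Int) : Decidable (Spec_slide line out) := by unfold Spec_slide; infer_instance

-- ===== CLAIM (what is proved, stated in full; the proofs are below) =====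
def Claim_equal_slide : Prop := ∀ (line : List Int), Dom_slide line → Spec_slide line (slide line)

-- ===== LEMMAS AND PROOFS =====

-- A's counting loop is List.count 0
theorem count_loop_eq (xs : List Int) :
    xs.foldl (fun n item => if item = 0 then n + 1 else n) 0 = (xs.count 0 : Int) := by
  suffices h : ∀ (init : Int), xs.foldl (fun n item => if item = 0 then n + 1 else n) init
      = init + (xs.count 0 : Int) by simpa using h 0
  induction xs with
  | nil => intro init; simp
  | cons x t ih =>
    intro init
    by_cases hx : x = 0 <;> simp [hx, ih] <;> ring

-- appending one 0 per element of a list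
theorem foldl_pad_zero (l : List Int) (init : List Int) :
    l.foldl (fun acc _ => acc ++ [(0 : Int)]) init = init ++ List.replicate l.length 0 := by
  induction l generalizing init with
  | nil => simp
  | cons x t ih =>
    rw [List.foldl_cons, ih, List.append_assoc]
    simp [List.replicate_succ]

-- A computes filter-then-pad
theorem slide_eq (line : List Int) :
    slide line = line.filter (fun x => x ≠ 0) ++ List.replicate (line.count 0) 0 := by
  unfold slide
  rw [count_loop_eq, foldl_pad_zero, PySem.List.foldl_append_ite_eq_filter,
    PySem.List.length_pyRange_one]
  simp

-- insertBy passes over a block whose elements never trigger `before`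
theorem insertBy_append_of_not_before (before : Int → Int → Bool) (x : Int) (F Z : List Int)
    (h : ∀ y ∈ F, before x y = false) :
    PySem.List.insertBy before x (F ++ Z) = F ++ PySem.List.insertBy before x Z := by
  induction F with
  | nil => simp
  | cons y t ih =>
    have hy : before x y = false := h y (by simp)
    simp [PySem.List.insertBy, hy, ih (fun z hz => h z (by simp [hz]))]

-- a non-zero tile inserted into a zero block goes in front of it
theorem insertBy_zero_block (x : Int) (hx : ¬ x = 0) (c : Nat) :
    PySem.List.insertBy (fun a b => decide ((a == 0) < (b == 0))) x (List.replicate c 0)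
      = x :: List.replicate c 0 := by
  cases c with
  | zero => simp [PySem.List.insertBy]
  | succ k =>
    have hxb : (x == 0) = false := by simp [hx]
    simp [List.replicate_succ, PySem.List.insertBy, hxb]

-- the stable insertion sort keeps the invariant "non-zeros in order, then zeros"
theorem sort_invariant (line : List Int) :
    List.foldl (fun acc x =>
        PySem.List.insertBy (fun a b => decide (((a == 0) : Bool) < (b == 0))) x acc) [] line
      = line.filter (fun x => x ≠ 0) ++ List.replicate (line.count 0) 0 := by
  induction line using List.reverseRecOn with
  | nil => simp
  | append_singleton xs x ih =>
    rw [List.foldl_append, List.foldl_cons, List.foldl_nil, ih]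
    by_cases hx : x = 0
    · subst hx
      rw [PySem.List.insertBy_of_forall_not_before]
      · simp [List.count_append, List.filter_append, List.append_assoc,
          ← List.replicate_succ']
      · intro y hy; simp
    · rw [insertBy_append_of_not_before, insertBy_zero_block x hx]
      · simp [List.count_append, List.filter_append, hx]
      · intro y hy
        have hyb : (y == 0) = false := by
          simpa using (List.of_mem_filter hy)
        simp [show (x == 0) = false by simp [hx], hyb]

-- ===== VERDICT (by name: the statement is the Claim_ definition above) =====
theorem slide_spec : Claim_equal_slide := by
  intro line _
  unfold Spec_slide slide_alt
  rw [PySem.List.sorted_eq_foldl_insertBy, sort_invariant, slide_eq]
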